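-- pv_equiv track=rewrite | github.com/Ambyli/Test-API | services/phase/shade_regex.py | combine_UL
-- ===== SOURCE A (Python) =====
-- def combine_UL(steps, divider="|"):
--     new_steps = []  # holds list of new steps
--
--     # make sure we have at least 1 step U01, and if U01 is at least 2 characters long
--     if len(steps) <= 1:
--         return steps
--
--     # [U01,U02,L01R,...] -> U01
--     while len(steps) != 0:
--         # set the new active_step
--         active_step = steps[0]
--         # if active step is less than 2 ex. U or '', minimum is UA or UR
--         if len(active_step) < 2:
--             # then ignore that false step and check the next
--             steps.remove(active_step)  # remove false active step
--             continue
--         # remove active step from steps, so len(steps) becomes len(steps)-1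
--         steps.remove(active_step)  # len(steps)-1
--         # U01 -> U
--         active_prefix = active_step[0]  # grab the active steps prefix
--         # U01R -> 01R
--         active_suffix = active_step[1:]  # grab the active steps suffix
--
--         # track if an item has been added into the new_steps
--         old_len = len(new_steps)
--
--         # [U01,L01,L01R,...] -> [U|L01,L01R,...]
--         for step in steps:
--             # if we find a successful match ex. U01 and L01
--             if step != active_step and step[1:] == active_suffix:
--                 # get the prefix of the step with a matching suffix
--                 # L01 -> L
--                 found_prefix = step[0]  # grab the found steps prefix
--                 # then remove it from the list
--                 steps.remove(step)  # len(steps)-1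
--                 # and add the new step form into the new_steps array
--                 new_steps.append(active_prefix + divider + found_prefix + active_suffix)
--                 # we made item combo, so leave loop
--                 break
--
--         # if we didnt add a new item from the above for loop
--         if len(new_steps) == old_len:
--             # then we didnt find a matching step ex. U01 and L01
--             # we must have no matches, append normal step
--             new_steps.append(active_step)
--
--     return new_steps
-- ===== SOURCE B (Python) =====
-- # Single pass with per-suffix queues (head-pointer deques): O(n) vs A's repeated
-- # in-place scans/removals. Return value only: A empties the input list, B does not mutate it.
-- def combine_UL(steps, divider="|"):
--     if len(steps) <= 1:
--         return steps
--     out = [None] * len(steps)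
--     pending = {}  # suffix -> [head, [(index, prefix_char), ...]]; live queue = items[head:]
--     for i, s in enumerate(steps):
--         if len(s) < 2:
--             continue
--         p = s[0]
--         suf = s[1:]
--         entry = pending.get(suf)
--         if entry is None:
--             pending[suf] = [0, [(i, p)]]
--             continue
--         head, items = entry
--         if head < len(items) and items[head][1] != p:
--             j, ap = items[head]
--             entry[0] = head + 1
--             out[j] = ap + divider + p + suf
--         else:
--             items.append((i, p))
--     for suf, (head, items) in pending.items():
--         for j, p in items[head:]:
--             out[j] = p + suf
--     return [x for x in out if x is not None]
-- ===== Notes on version B (the rewrite author's own statement) =====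
-- stated objective: faster
-- what changed: Replaced A's repeated leftmost-scan with in-place list removals by a single left-to-right pass that keeps, per suffix, a head-pointer queue of unpaired prefixes and emits each combined/single step into an output slot at the left element's index.
import Mathlib
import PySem

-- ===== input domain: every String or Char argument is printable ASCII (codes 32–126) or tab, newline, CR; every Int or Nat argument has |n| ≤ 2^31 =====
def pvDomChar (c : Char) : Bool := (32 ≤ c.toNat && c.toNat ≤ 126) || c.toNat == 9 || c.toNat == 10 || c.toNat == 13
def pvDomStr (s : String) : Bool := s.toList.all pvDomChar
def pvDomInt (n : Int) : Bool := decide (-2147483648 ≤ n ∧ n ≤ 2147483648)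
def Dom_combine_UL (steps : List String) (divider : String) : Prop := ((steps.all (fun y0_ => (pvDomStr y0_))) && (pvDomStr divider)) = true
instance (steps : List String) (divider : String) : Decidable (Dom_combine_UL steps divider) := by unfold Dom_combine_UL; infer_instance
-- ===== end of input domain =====

-- B replaces A's quadratic scan-and-remove pairing by one left-to-right pass with per-suffix
-- head-pointer queues (objective: faster). Return value only: Python A empties the input list
-- in place on the main path; B does not mutate it.

-- ===== PORT A =====
-- Python list.remove(x): drop the first occurrence of x (port of A's `steps.remove(...)`).
def pvRemoveFirst {α : Type} [DecidableEq α] (x : α) : List α → List α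
  | [] => []
  | y :: ys => if y = x then ys else y :: pvRemoveFirst x ys

-- used by the termination argument of A's while loop (each round removes at least one element)
theorem pvRemoveFirst_length_le {α : Type} [DecidableEq α] (x : α) (l : List α) :
    (pvRemoveFirst x l).length ≤ l.length := by
  induction l with
  | nil => simp [pvRemoveFirst]
  | cons y ys ih => simp only [pvRemoveFirst]; split <;> simp [ih]

-- A's inner `for step in steps: if step != active_step and step[1:] == active_suffix: ... break`
def pvFindA (active suffix : List Char) : List (List Char) → Option (List Char)
  | [] => none
  | s :: rest =>
    if s ≠ active ∧ s.drop 1 = suffix then some s else pvFindA active suffix rest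

-- A's `while len(steps) != 0` loop over the (mutated) steps list; strings as their char lists,
-- s[0] / s[1:] are `take 1` / `drop 1` (exact on any string), new_steps is the accumulator.
def pvLoopA (divider : List Char) : List (List Char) → List (List Char) → List (List Char)
  | [], acc => acc
  | active :: rest, acc =>
    if active.length < 2 then pvLoopA divider rest acc
    else
      match pvFindA active (active.drop 1) rest with
      | some found =>
          pvLoopA divider (pvRemoveFirst found rest)
            (acc ++ [active.take 1 ++ divider ++ found.take 1 ++ active.drop 1])
      | none => pvLoopA divider rest (acc ++ [active])
termination_by l _ => l.length
decreasing_by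
  · simp
  · have := pvRemoveFirst_length_le found rest; simp; omega
  · simp

def combine_UL (steps : List String) (divider : String) : List String :=
  if steps.length ≤ 1 then steps
  else (pvLoopA divider.toList (steps.map String.toList) []).map String.ofList

-- ===== PORT B =====
-- one step of B's scan: state = (out slots, pending dict suffix ↦ (head, [(index, prefix char)]))
def pvBStep (divider : List Char)
    (st : List (Option (List Char)) × PySem.Dict (List Char) (Nat × List (Nat × Char)))
    (e : Nat × List Char) :
    List (Option (List Char)) × PySem.Dict (List Char) (Nat × List (Nat × Char)) :=
  if e.2.length < 2 then st
  else
    let p := e.2.headD ' '      -- s[0]; the guard makes s nonempty, the default is never used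
    let suf := e.2.drop 1       -- s[1:]
    match st.2.get? suf with
    | none => (st.1, st.2.insert suf (0, [(e.1, p)]))
    | some (h, items) =>
      match items.drop h with   -- `head < len(items)` and `items[head]`: the live queue front
      | (j, ap) :: _ =>
        if ap ≠ p then
          (st.1.set j (some (ap :: (divider ++ p :: suf))), st.2.insert suf (h + 1, items))
        else (st.1, st.2.insert suf (h, items ++ [(e.1, p)]))
      | [] => (st.1, st.2.insert suf (h, items ++ [(e.1, p)]))

-- B's trailing loop: every still-pending (index, prefix) becomes a single step at its slot
def pvFinalizeB
    (st : List (Option (List Char)) × PySem.Dict (List Char) (Nat × List (Nat × Char))) :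
    List (Option (List Char)) :=
  st.2.items.foldl
    (fun out kv => (kv.2.2.drop kv.2.1).foldl (fun o jp => o.set jp.1 (some (jp.2 :: kv.1))) out)
    st.1

def combine_UL_alt (steps : List String) (divider : String) : List String :=
  if steps.length ≤ 1 then steps
  else
    let sl := steps.map String.toList
    -- enumerate(steps): the indices are the non-negative positions 0..n-1, kept as Nat
    let st := ((List.range sl.length).zip sl).foldl (pvBStep divider.toList)
                (List.replicate sl.length none, PySem.Dict.empty)
    ((pvFinalizeB st).filterMap id).map String.ofList

-- ===== PRECONDITION & SPEC =====
def Spec_combine_UL (steps : List String) (divider : String) (out : List String) : Prop := out = combine_UL_alt steps divider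
instance (steps : List String) (divider : String) (out : List String) : Decidable (Spec_combine_UL steps divider out) := by unfold Spec_combine_UL; infer_instance

-- ===== CLAIM (what is proved, stated in full; the proofs are below) =====
def Claim_equal_combine_UL : Prop := ∀ (steps : List String) (divider : String), Dom_combine_UL steps divider → Spec_combine_UL steps divider (combine_UL steps divider)

-- ===== LEMMAS AND PROOFS =====

-- ---- midpoint: A's pairing process on the ≥2-char steps, plain and with indices ----

def pvCRun (d : List Char) : List (List Char) → List (List Char)
  | [] => []
  | a :: xs =>
    match pvFindA a (a.drop 1) xs with
    | some z => (a.take 1 ++ d ++ z.take 1 ++ a.drop 1) :: pvCRun d (pvRemoveFirst z xs)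
    | none => a :: pvCRun d xs
termination_by l => l.length
decreasing_by
  · have := pvRemoveFirst_length_le z xs; simp; omega
  · simp

def pvFindI (active : List Char) : List (Nat × List Char) → Option (Nat × List Char)
  | [] => none
  | z :: rest =>
    if z.2 ≠ active ∧ z.2.drop 1 = active.drop 1 then some z else pvFindI active rest

def pvCIdx (d : List Char) : List (Nat × List Char) → List (Nat × List Char)
  | [] => []
  | a :: xs =>
    match pvFindI a.2 xs with
    | some z => (a.1, a.2.take 1 ++ d ++ z.2.take 1 ++ a.2.drop 1) :: pvCIdx d (pvRemoveFirst z xs)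
    | none => a :: pvCIdx d xs
termination_by l => l.length
decreasing_by
  · have := pvRemoveFirst_length_le z xs; simp; omega
  · simp

-- ---- generic facts about pvRemoveFirst / the finders ----

theorem pvRemoveFirst_sublist {α : Type} [DecidableEq α] (x : α) (l : List α) :
    List.Sublist (pvRemoveFirst x l) l := by
  induction l with
  | nil => simp [pvRemoveFirst]
  | cons y ys ih =>
    simp only [pvRemoveFirst]
    split
    · exact (List.sublist_cons_self y ys)
    · exact List.Sublist.cons₂ y ih

theorem pvRemoveFirst_append_of_not_mem {α : Type} [DecidableEq α] (x : α)
    (l₁ l₂ : List α) (h : x ∉ l₁) :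
    pvRemoveFirst x (l₁ ++ l₂) = l₁ ++ pvRemoveFirst x l₂ := by
  induction l₁ with
  | nil => simp
  | cons y ys ih =>
    simp only [List.cons_append, pvRemoveFirst]
    rw [if_neg (by rintro rfl; exact h (List.mem_cons_self))]
    rw [ih (fun hm => h (List.mem_cons_of_mem _ hm))]

theorem pvRemoveFirst_filter {α : Type} [DecidableEq α] (q : α → Bool) (x : α) (l : List α)
    (hx : q x = true) :
    List.filter q (pvRemoveFirst x l) = pvRemoveFirst x (List.filter q l) := by
  induction l with
  | nil => simp [pvRemoveFirst]
  | cons y ys ih =>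
    simp only [pvRemoveFirst]
    by_cases hyx : y = x
    · subst hyx; simp [hx, pvRemoveFirst]
    · by_cases hq : q y = true
      · simp [hq, hyx, pvRemoveFirst, ih]
      · simp only [if_neg hyx, List.filter_cons]
        simp only [hq]
        simpa using ih

theorem pvRemoveFirst_filter_of_neg {α : Type} [DecidableEq α] (q : α → Bool) (x : α)
    (l : List α) (hx : q x = false) :
    List.filter q (pvRemoveFirst x l) = List.filter q l := by
  induction l with
  | nil => simp [pvRemoveFirst]
  | cons y ys ih =>
    simp only [pvRemoveFirst]
    by_cases hyx : y = x
    · subst hyx; simp [hx]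
    · rw [if_neg hyx]
      simp only [List.filter_cons, ih]

theorem pvFindI_mem {active : List Char} {l : List (Nat × List Char)} {z : Nat × List Char}
    (h : pvFindI active l = some z) : z ∈ l := by
  induction l with
  | nil => simp [pvFindI] at h
  | cons y ys ih =>
    simp only [pvFindI] at h
    split at h
    · cases h; exact List.mem_cons_self
    · exact List.mem_cons_of_mem _ (ih h)

theorem pvFindI_spec {active : List Char} {l : List (Nat × List Char)} {z : Nat × List Char}
    (h : pvFindI active l = some z) : z.2 ≠ active ∧ z.2.drop 1 = active.drop 1 := by
  induction l with
  | nil => simp [pvFindI] at h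
  | cons y ys ih =>
    simp only [pvFindI] at h
    split at h
    · cases h; assumption
    · exact ih h

theorem pvFindI_append_of_none {active : List Char} {l₁ l₂ : List (Nat × List Char)}
    (h : ∀ z ∈ l₁, z.2.drop 1 = active.drop 1 → z.2 = active) :
    pvFindI active (l₁ ++ l₂) = pvFindI active l₂ := by
  induction l₁ with
  | nil => simp
  | cons y ys ih =>
    simp only [List.cons_append, pvFindI]
    rw [if_neg, ih (fun z hz => h z (List.mem_cons_of_mem _ hz))]
    rintro ⟨hne, hdrop⟩
    exact hne (h y List.mem_cons_self hdrop)

-- ---- A-port = pvCRun on the filtered list ----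

theorem pvFindA_filter {active suffix : List Char} (hs : suffix ≠ []) (l : List (List Char)) :
    pvFindA active suffix (l.filter (fun s => 2 ≤ s.length)) = pvFindA active suffix l := by
  induction l with
  | nil => simp
  | cons y ys ih =>
    by_cases hq : 2 ≤ y.length
    · rw [List.filter_cons_of_pos (by simpa using hq)]
      simp only [pvFindA, ih]
    · rw [List.filter_cons_of_neg (by simpa using hq)]
      have hdrop : y.drop 1 = [] := by
        cases y with
        | nil => rfl
        | cons c cs =>
          simp only [List.length_cons] at hq
          have : cs = [] := List.length_eq_zero_iff.mp (by omega)
          simp [this]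
      rw [ih]
      conv_rhs => rw [pvFindA]
      rw [if_neg]
      rintro ⟨_, hd⟩
      exact hs (hd ▸ hdrop ▸ rfl)

theorem pvLoopA_eq (d : List Char) (l acc : List (List Char)) :
    pvLoopA d l acc = acc ++ pvCRun d (l.filter (fun s => 2 ≤ s.length)) := by
  induction l, acc using pvLoopA.induct d with
  | case1 acc => simp [pvLoopA, pvCRun]
  | case2 active rest acc hshort ih =>
    rw [pvLoopA, if_pos hshort, ih,
      List.filter_cons_of_neg (by simp only [decide_eq_true_eq]; omega)]
  | case3 active rest acc hshort found hfind ih =>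
    have hlong : 2 ≤ active.length := by omega
    have hsuf : active.drop 1 ≠ [] := by
      intro hemp
      have := congrArg List.length hemp
      simp at this; omega
    have hfound : 2 ≤ found.length := by
      have h2 : found.drop 1 = active.drop 1 := by
        clear ih
        induction rest with
        | nil => simp [pvFindA] at hfind
        | cons y ys ih2 =>
          simp only [pvFindA] at hfind
          split at hfind
          · cases hfind; exact (by assumption : _ ∧ _).2
          · exact ih2 hfind
      have := congrArg List.length h2
      simp at this; omega
    rw [pvLoopA]
    simp only [if_neg (show ¬ active.length < 2 by omega), hfind]
    rw [ih, List.filter_cons_of_pos (by simpa using hlong)]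
    conv_rhs => rw [pvCRun]
    rw [pvFindA_filter hsuf]
    simp only [hfind]
    rw [pvRemoveFirst_filter _ _ _ (by simpa using hfound)]
    simp
  | case4 active rest acc hshort hfind ih =>
    have hlong : 2 ≤ active.length := by omega
    have hsuf : active.drop 1 ≠ [] := by
      intro hemp
      have := congrArg List.length hemp
      simp at this; omega
    rw [pvLoopA]
    simp only [if_neg (show ¬ active.length < 2 by omega), hfind]
    rw [ih, List.filter_cons_of_pos (by simpa using hlong)]
    conv_rhs => rw [pvCRun]
    rw [pvFindA_filter hsuf]
    simp only [hfind]
    simp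

-- ---- pvCIdx projects to pvCRun ----

theorem pvFindI_proj (a : List Char) (l : List (Nat × List Char)) :
    (pvFindI a l).map Prod.snd = pvFindA a (a.drop 1) (l.map Prod.snd) := by
  induction l with
  | nil => simp [pvFindI, pvFindA]
  | cons z rest ih =>
    simp only [pvFindI, List.map_cons, pvFindA]
    split
    · rfl
    · exact ih

theorem pvRemoveFirstI_proj {a : List Char} {l : List (Nat × List Char)} {z : Nat × List Char}
    (h : pvFindI a l = some z) :
    (pvRemoveFirst z l).map Prod.snd = pvRemoveFirst z.2 (l.map Prod.snd) := by
  have hz := pvFindI_spec h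
  induction l with
  | nil => simp [pvFindI] at h
  | cons w rest ih =>
    simp only [pvFindI] at h
    split at h
    · cases h
      simp [pvRemoveFirst]
    · rename_i hw
      have hwz : w ≠ z := by
        rintro rfl; exact hw ⟨hz.1, hz.2⟩
      have hwz2 : w.2 ≠ z.2 := by
        intro h2; exact hw ⟨h2 ▸ hz.1, h2 ▸ hz.2⟩
      simp only [pvRemoveFirst, List.map_cons, if_neg hwz, if_neg hwz2, List.map_cons]
      rw [ih h]

theorem pvCIdx_proj (d : List Char) (l : List (Nat × List Char)) :
    (pvCIdx d l).map Prod.snd = pvCRun d (l.map Prod.snd) := by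
  induction l using pvCIdx.induct with
  | case1 => simp [pvCIdx, pvCRun]
  | case2 a xs z hfind ih =>
    rw [pvCIdx]
    simp only [hfind]
    conv_rhs => rw [List.map_cons, pvCRun]
    rw [← pvFindI_proj]
    simp only [hfind, Option.map_some, List.map_cons]
    rw [ih, pvRemoveFirstI_proj hfind]
  | case3 a xs hfind ih =>
    rw [pvCIdx]
    simp only [hfind]
    conv_rhs => rw [List.map_cons, pvCRun]
    rw [← pvFindI_proj]
    simp only [hfind, Option.map_none, List.map_cons]
    rw [ih]

-- ---- writes ----

def pvWriteAll (out : List (Option (List Char))) (l : List (Nat × List Char)) :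
    List (Option (List Char)) :=
  l.foldl (fun o z => o.set z.1 (some z.2)) out

theorem pvWriteAll_length (out : List (Option (List Char))) (l : List (Nat × List Char)) :
    (pvWriteAll out l).length = out.length := by
  induction l generalizing out with
  | nil => rfl
  | cons z t ih =>
    have : pvWriteAll out (z :: t) = pvWriteAll (out.set z.1 (some z.2)) t := rfl
    rw [this, ih, List.length_set]

theorem pvWriteAll_getElem? (out : List (Option (List Char))) (l : List (Nat × List Char))
    (hb : ∀ z ∈ l, z.1 < out.length) (hnd : (l.map Prod.fst).Nodup) (m : Nat) :
    (pvWriteAll out l)[m]? =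
      match l.find? (fun z => z.1 == m) with
      | some z => some (some z.2)
      | none => out[m]? := by
  induction l generalizing out with
  | nil => rfl
  | cons z t ih =>
    have hnd' : (t.map Prod.fst).Nodup := (List.nodup_cons.mp (by simpa using hnd)).2
    have hzt : z.1 ∉ t.map Prod.fst := (List.nodup_cons.mp (by simpa using hnd)).1
    have hstep : pvWriteAll out (z :: t) = pvWriteAll (out.set z.1 (some z.2)) t := rfl
    rw [hstep, ih _ (fun w hw => by
      simpa using hb w (List.mem_cons_of_mem _ hw)) hnd']
    by_cases hm : z.1 = m
    · subst hm
      have hfind : t.find? (fun w => w.1 == z.1) = none := by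
        rw [List.find?_eq_none]
        intro w hw hbeq
        exact hzt (by
          have hw1 : w.1 = z.1 := by simpa using hbeq
          exact hw1 ▸ List.mem_map_of_mem hw)
      rw [hfind, List.getElem?_set_self (hb z List.mem_cons_self)]
      conv_rhs => rw [List.find?_cons_of_pos (by simp)]
    · conv_rhs => rw [List.find?_cons_of_neg (by simpa using hm)]
      cases hf : t.find? (fun w : Nat × List Char => w.1 == m) with
      | none => exact List.getElem?_set_ne hm
      | some w => rfl

theorem pvWriteAll_perm (out : List (Option (List Char))) {l l' : List (Nat × List Char)}
    (hp : l.Perm l') (hnd : (l.map Prod.fst).Nodup) :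
    pvWriteAll out l = pvWriteAll out l' := by
  refine hp.foldl_eq' ?_ out
  intro x hx y hy o
  by_cases hxy : x = y
  · subst hxy; rfl
  · have hne : x.1 ≠ y.1 := fun h1 =>
      hxy (List.inj_on_of_nodup_map hnd hx hy h1)
    exact List.set_comm _ _ hne

theorem pvFilterMap_range_find (n : Nat) (c : List (Nat × List Char))
    (hs : (c.map Prod.fst).Pairwise (· < ·)) (hb : ∀ z ∈ c, z.1 < n) :
    (List.range n).filterMap
        (fun m => (c.find? (fun z => z.1 == m)).map Prod.snd) = c.map Prod.snd := by
  induction n generalizing c with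
  | zero =>
    cases c with
    | nil => rfl
    | cons z t => exact absurd (hb z List.mem_cons_self) (by omega)
  | succ n ih =>
    rcases List.eq_nil_or_concat c with rfl | ⟨c', z, rfl⟩
    · simp
    · simp only [List.concat_eq_append] at hs hb ⊢
      have hpw := List.pairwise_append.mp (by simpa using hs)
      have hc'z : ∀ w ∈ c', w.1 < z.1 := by
        intro w hw
        exact hpw.2.2 w.1 (List.mem_map_of_mem hw) z.1 (by simp)
      rw [List.range_succ, List.filterMap_append]
      by_cases hz : z.1 = n
      · have h1 : (List.range n).filterMap
              (fun m => (((c' ++ [z]).find? (fun w => w.1 == m)).map Prod.snd)) =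
            (List.range n).filterMap (fun m => ((c'.find? (fun w => w.1 == m)).map Prod.snd)) := by
          apply List.filterMap_congr
          intro m hm
          have hmn : m < n := List.mem_range.mp hm
          rw [List.find?_append]
          have hzn : [z].find? (fun w : Nat × List Char => w.1 == m) = none := by
            rw [List.find?_eq_none]
            intro w hw hbeq
            simp only [List.mem_singleton] at hw
            subst hw
            have : w.1 = m := by simpa using hbeq
            omega
          rw [hzn, Option.or_none]
        rw [h1, ih c' hpw.1 (fun w hw => by have := hc'z w hw; omega)]
        have hnone : c'.find? (fun w : Nat × List Char => w.1 == n) = none := by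
          rw [List.find?_eq_none]
          intro w hw hbeq
          have h1 := hc'z w hw
          have h2 : w.1 = n := by simpa using hbeq
          omega
        have h2 : ([n].filterMap
            (fun m => (((c' ++ [z]).find? (fun w => w.1 == m)).map Prod.snd))) = [z.2] := by
          simp [List.find?_append, hnone, hz]
        rw [h2]
        simp
      · have hball : ∀ w ∈ c' ++ [z], w.1 < n := by
          intro w hw
          rcases List.mem_append.mp hw with hw | hw
          · have h1 := hc'z w hw
            have h2 := hb z (by simp)
            omega
          · simp only [List.mem_singleton] at hw
            subst hw
            have h2 := hb w (by simp)
            omega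
        have hnone : (c' ++ [z]).find? (fun w : Nat × List Char => w.1 == n) = none := by
          rw [List.find?_eq_none]
          intro w hw hbeq
          have h1 := hball w hw
          have h2 : w.1 = n := by simpa using hbeq
          omega
        rw [ih (c' ++ [z]) (by simpa using hs) hball]
        simp
        exact ⟨fun a b hab => by have := hball (a, b) (List.mem_append_left _ hab); omega, hz⟩

theorem pvWriteAll_filterMap (n : Nat) (c : List (Nat × List Char))
    (hs : (c.map Prod.fst).Pairwise (· < ·)) (hb : ∀ z ∈ c, z.1 < n) :
    (pvWriteAll (List.replicate n none) c).filterMap id = c.map Prod.snd := by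
  have hnd : (c.map Prod.fst).Nodup := hs.imp (fun h => Nat.ne_of_lt h)
  have hlen : (pvWriteAll (List.replicate n none) c).length = n := by
    rw [pvWriteAll_length, List.length_replicate]
  have harr : pvWriteAll (List.replicate n none) c =
      (List.range n).map (fun m => (c.find? (fun z => z.1 == m)).map Prod.snd) := by
    apply List.ext_getElem?
    intro m
    by_cases hm : m < n
    · rw [pvWriteAll_getElem? _ _ (fun z hz => by
        rw [List.length_replicate]; exact hb z hz) hnd]
      rw [List.getElem?_map, List.getElem?_range hm]
      cases hf : c.find? (fun z => z.1 == m) with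
      | none => simp [hf, hm]
      | some z => simp [hf]
    · rw [List.getElem?_eq_none (by omega), List.getElem?_eq_none (by simp; omega)]
  rw [harr, List.filterMap_map]
  have : (Option.map Prod.snd ∘ fun m => c.find? (fun z => z.1 == m)) =
      fun m => (c.find? (fun z => z.1 == m)).map Prod.snd := rfl
  rw [show (id ∘ fun m => (c.find? (fun z => z.1 == m)).map Prod.snd) =
      (fun m => (c.find? (fun z => z.1 == m)).map Prod.snd) from rfl]
  exact pvFilterMap_range_find n c hs hb

-- ---- structural facts about pvCIdx ----

theorem pvCIdx_fst_sublist (d : List Char) (l : List (Nat × List Char)) :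
    List.Sublist ((pvCIdx d l).map Prod.fst) (l.map Prod.fst) := by
  induction l using pvCIdx.induct with
  | case1 => simp [pvCIdx]
  | case2 a xs z hfind ih =>
    rw [pvCIdx]
    simp only [hfind, List.map_cons]
    refine List.Sublist.cons₂ _ (ih.trans ?_)
    exact (pvRemoveFirst_sublist z xs).map Prod.fst
  | case3 a xs hfind ih =>
    rw [pvCIdx]
    simp only [hfind, List.map_cons]
    exact List.Sublist.cons₂ _ ih

def pvPairless (P : List (Nat × List Char)) : Prop :=
  ∀ a ∈ P, ∀ b ∈ P, a.2.drop 1 = b.2.drop 1 → a.2 = b.2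

theorem pvCIdx_pairless {d : List Char} {P : List (Nat × List Char)} (h : pvPairless P) :
    pvCIdx d P = P := by
  induction P using pvCIdx.induct with
  | case1 => simp [pvCIdx]
  | case2 a xs z hfind ih =>
    exfalso
    have hspec := pvFindI_spec hfind
    have hz := pvFindI_mem hfind
    exact hspec.1 (h z (List.mem_cons_of_mem _ hz) a List.mem_cons_self hspec.2)
  | case3 a xs hfind ih =>
    rw [pvCIdx]
    simp only [hfind]
    rw [ih (fun x hx y hy hxy =>
      h x (List.mem_cons_of_mem _ hx) y (List.mem_cons_of_mem _ hy) hxy)]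

theorem pvNodupFst_not_mem {L1 L2 : List (Nat × List Char)}
    (h : ((L1 ++ L2).map Prod.fst).Nodup) : ∀ w ∈ L2, w ∉ L1 := by
  intro w hw hw1
  rw [List.map_append, List.nodup_append] at h
  exact h.2.2 w.1 (List.mem_map_of_mem hw1) w.1 (List.mem_map_of_mem hw) rfl

-- the absorption step: an arriving element pairs with the FIRST same-suffix pending element
theorem pvCIdx_absorb (d : List Char) :
    ∀ (P rem : List (Nat × List Char)) (e z : Nat × List Char),
    pvPairless P →
    (P.filter (fun w => w.2.drop 1 = e.2.drop 1)).head? = some z →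
    z.2 ≠ e.2 →
    ((P ++ e :: rem).map Prod.fst).Nodup →
    (pvCIdx d (P ++ e :: rem)).Perm
      ((z.1, z.2.take 1 ++ d ++ e.2.take 1 ++ z.2.drop 1) :: pvCIdx d (pvRemoveFirst z P ++ rem)) := by
  intro P
  induction P with
  | nil => intro rem e z _ hhead; simp at hhead
  | cons a P1 ih =>
    intro rem e z hPl hhead hne hNd
    by_cases hpa : a.2.drop 1 = e.2.drop 1
    · -- the head of P is the first same-suffix element: a = z
      rw [List.filter_cons_of_pos (by simpa using hpa)] at hhead
      simp only [List.head?_cons, Option.some.injEq] at hhead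
      subst hhead
      have hfP1 : ∀ v ∈ P1, v.2.drop 1 = a.2.drop 1 → v.2 = a.2 := fun v hv =>
        hPl v (List.mem_cons_of_mem _ hv) a List.mem_cons_self
      have hfind : pvFindI a.2 (P1 ++ e :: rem) = some e := by
        rw [pvFindI_append_of_none hfP1, pvFindI,
          if_pos ⟨fun h2 => hne h2.symm, hpa.symm⟩]
      have heP1 : e ∉ P1 := by
        intro hmem
        exact pvNodupFst_not_mem (L1 := a :: P1) (by simpa using hNd) e
          List.mem_cons_self (List.mem_cons_of_mem _ hmem)
      rw [List.cons_append, pvCIdx]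
      simp only [hfind]
      rw [pvRemoveFirst_append_of_not_mem _ _ _ heP1,
        show pvRemoveFirst e (e :: rem) = rem by rw [pvRemoveFirst, if_pos rfl],
        show pvRemoveFirst a (a :: P1) = P1 by rw [pvRemoveFirst, if_pos rfl]]
    · -- the head of P has a different suffix: it keeps its own (later) partner
      rw [List.filter_cons_of_neg (by simpa using hpa)] at hhead
      have hzfil : z ∈ P1.filter (fun w => decide (w.2.drop 1 = e.2.drop 1)) :=
        List.mem_of_mem_head? (by rw [hhead]; rfl)
      have hzP1 : z ∈ P1 := (List.mem_filter.mp hzfil).1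
      have hza : a ≠ z := by
        rintro rfl
        exact hpa (by simpa using (List.mem_filter.mp hzfil).2)
      have hfP1 : ∀ v ∈ P1, v.2.drop 1 = a.2.drop 1 → v.2 = a.2 := fun v hv =>
        hPl v (List.mem_cons_of_mem _ hv) a List.mem_cons_self
      have hfP1' : ∀ v ∈ pvRemoveFirst z P1, v.2.drop 1 = a.2.drop 1 → v.2 = a.2 := fun v hv =>
        hfP1 v ((pvRemoveFirst_sublist z P1).mem hv)
      have hNd1 : ((P1 ++ e :: rem).map Prod.fst).Nodup := by
        rw [List.cons_append, List.map_cons, List.nodup_cons] at hNd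
        exact hNd.2
      have hPl1 : pvPairless P1 := fun x hx y hy =>
        hPl x (List.mem_cons_of_mem _ hx) y (List.mem_cons_of_mem _ hy)
      have hfind0 : pvFindI a.2 (P1 ++ e :: rem) = pvFindI a.2 rem := by
        rw [pvFindI_append_of_none hfP1, pvFindI,
          if_neg (by rintro ⟨_, h2⟩; exact hpa h2.symm)]
      cases hf : pvFindI a.2 rem with
      | none =>
        have ihx := ih rem e z hPl1 hhead hne hNd1
        rw [List.cons_append, pvCIdx]
        simp only [hfind0, hf]
        rw [show pvRemoveFirst z (a :: P1) = a :: pvRemoveFirst z P1 by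
          rw [pvRemoveFirst, if_neg hza], List.cons_append, pvCIdx]
        simp only [show pvFindI a.2 (pvRemoveFirst z P1 ++ rem) = none by
          rw [pvFindI_append_of_none hfP1', hf]]
        refine List.Perm.trans (List.Perm.cons _ ihx) (List.Perm.swap _ _ _)
      | some w =>
        have hwrem : w ∈ rem := pvFindI_mem hf
        have hwP1 : w ∉ P1 := by
          intro hmem
          refine pvNodupFst_not_mem (L1 := a :: P1) (by simpa using hNd) w
            (List.mem_cons_of_mem _ hwrem) (List.mem_cons_of_mem _ hmem)
        have hwe : e ≠ w := by
          rintro rfl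
          rw [List.cons_append, List.map_cons, List.nodup_cons] at hNd
          have : ((P1 ++ e :: rem).map Prod.fst).Nodup := hNd.2
          rw [List.map_append, List.nodup_append] at this
          have h2 := this.2.1
          rw [List.map_cons, List.nodup_cons] at h2
          exact h2.1 (List.mem_map_of_mem hwrem)
        have hwP1' : w ∉ pvRemoveFirst z P1 := fun hmem =>
          hwP1 ((pvRemoveFirst_sublist z P1).mem hmem)
        have hrem' : pvRemoveFirst w (P1 ++ e :: rem) = P1 ++ e :: pvRemoveFirst w rem := by
          rw [pvRemoveFirst_append_of_not_mem _ _ _ hwP1, pvRemoveFirst, if_neg hwe]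
        have hNd2 : ((P1 ++ e :: pvRemoveFirst w rem).map Prod.fst).Nodup := by
          refine List.Nodup.sublist (List.Sublist.map _ ?_) hNd1
          exact List.Sublist.append_left (List.Sublist.cons₂ _ (pvRemoveFirst_sublist w rem)) P1
        have ihx := ih (pvRemoveFirst w rem) e z hPl1 hhead hne hNd2
        rw [List.cons_append, pvCIdx]
        simp only [hfind0, hf]
        rw [hrem']
        rw [show pvRemoveFirst z (a :: P1) = a :: pvRemoveFirst z P1 by
          rw [pvRemoveFirst, if_neg hza], List.cons_append, pvCIdx]
        simp only [show pvFindI a.2 (pvRemoveFirst z P1 ++ rem) = some w by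
          rw [pvFindI_append_of_none hfP1', hf]]
        rw [pvRemoveFirst_append_of_not_mem _ _ _ hwP1']
        refine List.Perm.trans (List.Perm.cons _ ihx) (List.Perm.swap _ _ _)

-- ---- the pending dict's live queue, and the main simulation invariant ----

def pvQueue (pending : PySem.Dict (List Char) (Nat × List (Nat × Char))) (suf : List Char) :
    List (Nat × List Char) :=
  match pending.get? suf with
  | none => []
  | some (h, items) => (items.drop h).map (fun jp => (jp.1, jp.2 :: suf))

def pvDW (pending : PySem.Dict (List Char) (Nat × List (Nat × Char))) : Prop :=
  pending.keys.Nodup ∧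
    ∀ suf h items, pending.get? suf = some (h, items) → h ≤ items.length

theorem pvQueue_none {pending : PySem.Dict (List Char) (Nat × List (Nat × Char))} {suf : List Char}
    (h : pending.get? suf = none) : pvQueue pending suf = [] := by
  rw [pvQueue]; simp only [h]

theorem pvQueue_some {pending : PySem.Dict (List Char) (Nat × List (Nat × Char))} {suf : List Char}
    {h0 : Nat} {items : List (Nat × Char)} (h : pending.get? suf = some (h0, items)) :
    pvQueue pending suf = (items.drop h0).map (fun jp => (jp.1, jp.2 :: suf)) := by
  rw [pvQueue]; simp only [h]

theorem pvPairless_append {P : List (Nat × List Char)} {e : Nat × List Char}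
    (hPl : pvPairless P) (h : ∀ w ∈ P, w.2.drop 1 = e.2.drop 1 → w.2 = e.2) :
    pvPairless (P ++ [e]) := by
  intro x hx y hy hxy
  rcases List.mem_append.mp hx with hx1 | hx1
  · rcases List.mem_append.mp hy with hy1 | hy1
    · exact hPl x hx1 y hy1 hxy
    · have hy2 : y = e := by simpa using hy1
      rw [hy2] at hxy ⊢
      exact h x hx1 hxy
  · have hx2 : x = e := by simpa using hx1
    rcases List.mem_append.mp hy with hy1 | hy1
    · rw [hx2] at hxy ⊢
      exact (h y hy1 hxy.symm).symm
    · have hy2 : y = e := by simpa using hy1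
      rw [hx2, hy2]

theorem pvBucket_perm (keys : List (List Char)) (P : List (Nat × List Char))
    (hnd : keys.Nodup) (hmem : ∀ w ∈ P, w.2.drop 1 ∈ keys) :
    (keys.flatMap (fun k => P.filter (fun w => w.2.drop 1 = k))).Perm P := by
  induction P with
  | nil => simp
  | cons w T ih =>
    obtain ⟨K1, K2, hk⟩ := List.append_of_mem (hmem w List.mem_cons_self)
    subst hk
    have hnd' : (w.2.drop 1 :: (K1 ++ K2)).Nodup := List.nodup_middle.mp hnd
    rw [List.nodup_cons] at hnd'
    have hkey1 : w.2.drop 1 ∉ K1 := fun hmem1 => hnd'.1 (List.mem_append_left _ hmem1)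
    have hkey2 : w.2.drop 1 ∉ K2 := fun hmem2 => hnd'.1 (List.mem_append_right _ hmem2)
    have hsplit : ∀ (T' : List (Nat × List Char)),
        ((K1 ++ w.2.drop 1 :: K2).flatMap (fun k => T'.filter (fun v => v.2.drop 1 = k))) =
        (K1.flatMap (fun k => T'.filter (fun v => v.2.drop 1 = k))) ++
          (T'.filter (fun v => v.2.drop 1 = w.2.drop 1)) ++
          (K2.flatMap (fun k => T'.filter (fun v => v.2.drop 1 = k))) := by
      intro T'
      rw [List.flatMap_append, List.flatMap_cons, List.append_assoc]
    rw [hsplit]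
    have hK1 : (K1.flatMap (fun k => (w :: T).filter (fun v => v.2.drop 1 = k))) =
        (K1.flatMap (fun k => T.filter (fun v => v.2.drop 1 = k))) := by
      apply List.flatMap_congr
      intro k hk1
      rw [List.filter_cons_of_neg]
      simp only [decide_eq_true_eq]
      rintro rfl
      exact hkey1 hk1
    have hK2 : (K2.flatMap (fun k => (w :: T).filter (fun v => v.2.drop 1 = k))) =
        (K2.flatMap (fun k => T.filter (fun v => v.2.drop 1 = k))) := by
      apply List.flatMap_congr
      intro k hk2
      rw [List.filter_cons_of_neg]
      simp only [decide_eq_true_eq]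
      rintro rfl
      exact hkey2 hk2
    have hmid : ((w :: T).filter (fun v => v.2.drop 1 = w.2.drop 1)) =
        w :: (T.filter (fun v => v.2.drop 1 = w.2.drop 1)) := by
      rw [List.filter_cons_of_pos (by simp)]
    rw [hK1, hK2, hmid]
    have ihx := ih (fun v hv => hmem v (List.mem_cons_of_mem _ hv))
    rw [hsplit] at ihx
    have hassoc : (K1.flatMap (fun k => T.filter (fun v => v.2.drop 1 = k))) ++
          (w :: (T.filter (fun v => v.2.drop 1 = w.2.drop 1))) ++
          (K2.flatMap (fun k => T.filter (fun v => v.2.drop 1 = k)))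
        = (K1.flatMap (fun k => T.filter (fun v => v.2.drop 1 = k))) ++
          (w :: ((T.filter (fun v => v.2.drop 1 = w.2.drop 1)) ++
          (K2.flatMap (fun k => T.filter (fun v => v.2.drop 1 = k))))) := by
      simp [List.append_assoc]
    rw [hassoc]
    refine List.Perm.trans List.perm_middle ?_
    refine List.Perm.cons _ ?_
    rw [← List.append_assoc]
    exact ihx

theorem pvFinalizeB_eq (out : List (Option (List Char)))
    (pending : PySem.Dict (List Char) (Nat × List (Nat × Char))) :
    pvFinalizeB (out, pending) =
      pvWriteAll out
        (pending.items.flatMap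
          (fun kv => (kv.2.2.drop kv.2.1).map (fun jp => (jp.1, jp.2 :: kv.1)))) := by
  show pending.items.foldl _ out = _
  generalize pending.items = L
  induction L generalizing out with
  | nil => rfl
  | cons kv t ih =>
    rw [List.foldl_cons, ih, List.flatMap_cons]
    unfold pvWriteAll
    rw [List.foldl_append, List.foldl_map]

theorem pvMain (d : List Char) :
    ∀ (rem : List (Nat × List Char)) (out : List (Option (List Char)))
      (pending : PySem.Dict (List Char) (Nat × List (Nat × Char))) (P : List (Nat × List Char)),
    (∀ e ∈ rem, 2 ≤ e.2.length) →
    (∀ suf, pvQueue pending suf = P.filter (fun w => w.2.drop 1 = suf)) →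
    (∀ w ∈ P, 2 ≤ w.2.length) →
    pvPairless P →
    ((P ++ rem).map Prod.fst).Nodup →
    pvDW pending →
    pvFinalizeB (rem.foldl (pvBStep d) (out, pending)) = pvWriteAll out (pvCIdx d (P ++ rem)) := by
  intro rem
  induction rem with
  | nil =>
    intro out pending P hF hQ hLen hPl hNd hW
    rw [List.foldl_nil, List.append_nil, pvCIdx_pairless hPl, pvFinalizeB_eq]
    have hitems : pending.items.flatMap
        (fun kv => (kv.2.2.drop kv.2.1).map (fun jp => (jp.1, jp.2 :: kv.1))) =
        pending.keys.flatMap (fun k => P.filter (fun w => w.2.drop 1 = k)) := by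
      have h1 : pending.keys.flatMap (fun k => P.filter (fun w => w.2.drop 1 = k)) =
          pending.items.flatMap ((fun k => P.filter (fun w => w.2.drop 1 = k)) ∘ Prod.fst) := by
        show (pending.items.map Prod.fst).flatMap _ = _
        rw [List.flatMap_map]
        rfl
      rw [h1]
      apply List.flatMap_congr
      intro kv hkv
      simp only [Function.comp_apply]
      have hget : pending.get? kv.1 = some kv.2 :=
        PySem.Dict.get?_of_mem_items pending (by simpa using hkv) hW.1
      have := pvQueue_some (h0 := kv.2.1) (items := kv.2.2) (by simpa using hget)
      rw [← hQ kv.1, this]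
    rw [hitems]
    have hmem : ∀ w ∈ P, w.2.drop 1 ∈ pending.keys := by
      intro w hw
      by_contra hcon
      have hnone : pending.get? (w.2.drop 1) = none :=
        (PySem.Dict.get?_eq_none_iff_not_mem_keys pending _).mpr hcon
      have h0 := (pvQueue_none hnone).symm.trans (hQ (w.2.drop 1))
      have : w ∈ P.filter (fun v => v.2.drop 1 = w.2.drop 1) :=
        List.mem_filter.mpr ⟨hw, by simp⟩
      rw [← h0] at this
      simp at this
    have hperm := pvBucket_perm pending.keys P hW.1 hmem
    have hndP : (P.map Prod.fst).Nodup := by simpa using hNd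
    have hndFl : ((pending.keys.flatMap
        (fun k => P.filter (fun w => w.2.drop 1 = k))).map Prod.fst).Nodup := by
      rw [List.Perm.nodup_iff (hperm.map Prod.fst)]
      exact hndP
    exact pvWriteAll_perm out hperm hndFl
  | cons e rem' ih =>
    intro out pending P hF hQ hLen hPl hNd hW
    have he : 2 ≤ e.2.length := hF e List.mem_cons_self
    obtain ⟨p, suf, he2⟩ : ∃ p suf, e.2 = p :: suf := by
      cases h : e.2 with
      | nil => rw [h] at he; simp at he
      | cons p suf => exact ⟨p, suf, rfl⟩
    have hpd : e.2.headD ' ' = p := by rw [he2]; rfl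
    have hsd : e.2.drop 1 = suf := by rw [he2]; rfl
    have ht : e.2.tail = suf := by rw [he2]; rfl
    have hF' : ∀ w ∈ rem', 2 ≤ w.2.length := fun w hw => hF w (List.mem_cons_of_mem _ hw)
    have hNdflat : ((P ++ [e] ++ rem').map Prod.fst).Nodup := by
      rw [List.append_assoc]; exact hNd
    rw [List.foldl_cons]
    rcases hg : pending.get? suf with _ | ⟨h0, items⟩
    · -- no queue for this suffix yet: e becomes pending
      have hx : pvBStep d (out, pending) e = (out, pending.insert suf (0, [(e.1, p)])) := by
        rw [pvBStep, if_neg (by omega)]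
        simp only [hsd, hpd, hg]
      have hfil : P.filter (fun w => w.2.drop 1 = suf) = [] := by
        rw [← hQ suf, pvQueue_none hg]
      have hQ' : ∀ s, pvQueue (pending.insert suf (0, [(e.1, p)])) s =
          (P ++ [e]).filter (fun w => w.2.drop 1 = s) := by
        intro s
        rw [List.filter_append]
        by_cases hs : s = suf
        · rw [hs, pvQueue_some (PySem.Dict.get?_insert_self _ _ _), hfil]
          simp [← he2, ht]
        · rw [pvQueue, PySem.Dict.get?_insert_of_ne _ _ hs, ← pvQueue, hQ s]
          have hnil : [e].filter (fun w => w.2.drop 1 = s) = [] := by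
            have hdec : (decide (e.2.tail = s)) = false := by
              rw [ht]; exact decide_eq_false (fun h => hs h.symm)
            simp [List.filter, List.drop_one, hdec]
          rw [hnil, List.append_nil]
      have hPl' : pvPairless (P ++ [e]) := by
        refine pvPairless_append hPl ?_
        intro w hw hww
        exfalso
        have : w ∈ P.filter (fun v => v.2.drop 1 = suf) :=
          List.mem_filter.mpr ⟨hw, by simp [hww, hsd]⟩
        rw [hfil] at this
        simp at this
      have hW' : pvDW (pending.insert suf (0, [(e.1, p)])) := by
        refine ⟨PySem.Dict.nodup_keys_insert _ _ _ hW.1, ?_⟩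
        intro s hh ii hgi
        by_cases hs : s = suf
        · subst hs
          rw [PySem.Dict.get?_insert_self] at hgi
          cases hgi; simp
        · rw [PySem.Dict.get?_insert_of_ne _ _ hs] at hgi
          exact hW.2 s hh ii hgi
      rw [hx, ih out _ (P ++ [e]) hF' hQ'
        (fun w hw => by
          rcases List.mem_append.mp hw with hw | hw
          · exact hLen w hw
          · simp only [List.mem_singleton] at hw; subst hw; exact he)
        hPl' hNdflat hW']
      rw [List.append_assoc]
      rfl
    · rcases hd : items.drop h0 with _ | ⟨⟨j, ap⟩, qtail⟩
      · -- queue exists but is empty: e becomes pending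
        have hx : pvBStep d (out, pending) e =
            (out, pending.insert suf (h0, items ++ [(e.1, p)])) := by
          rw [pvBStep, if_neg (by omega)]
          simp only [hsd, hpd, hg, hd]
        have hfil : P.filter (fun w => w.2.drop 1 = suf) = [] := by
          rw [← hQ suf, pvQueue_some hg, hd]; rfl
        have hh0 : h0 = items.length := by
          have h1 := hW.2 suf h0 items hg
          have h2 : items.length ≤ h0 := by
            by_contra hcon
            have : items.drop h0 ≠ [] := by
              simp only [ne_eq, List.drop_eq_nil_iff]
              omega
            exact this hd
          omega
        have hQ' : ∀ s, pvQueue (pending.insert suf (h0, items ++ [(e.1, p)])) s =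
            (P ++ [e]).filter (fun w => w.2.drop 1 = s) := by
          intro s
          rw [List.filter_append]
          by_cases hs : s = suf
          · rw [hs, pvQueue_some (PySem.Dict.get?_insert_self _ _ _), hfil, hh0, List.drop_left]
            simp [← he2, ht]
          · rw [pvQueue, PySem.Dict.get?_insert_of_ne _ _ hs, ← pvQueue, hQ s]
            have hnil : [e].filter (fun w => w.2.drop 1 = s) = [] := by
              have hdec : (decide (e.2.tail = s)) = false := by
                rw [ht]; exact decide_eq_false (fun h => hs h.symm)
              simp [List.filter, List.drop_one, hdec]
            rw [hnil, List.append_nil]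
        have hPl' : pvPairless (P ++ [e]) := by
          refine pvPairless_append hPl ?_
          intro w hw hww
          exfalso
          have : w ∈ P.filter (fun v => v.2.drop 1 = suf) :=
            List.mem_filter.mpr ⟨hw, by simp [hww, hsd]⟩
          rw [hfil] at this
          simp at this
        have hW' : pvDW (pending.insert suf (h0, items ++ [(e.1, p)])) := by
          refine ⟨PySem.Dict.nodup_keys_insert _ _ _ hW.1, ?_⟩
          intro s hh ii hgi
          by_cases hs : s = suf
          · subst hs
            rw [PySem.Dict.get?_insert_self] at hgi
            cases hgi
            rw [List.length_append]
            omega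
          · rw [PySem.Dict.get?_insert_of_ne _ _ hs] at hgi
            exact hW.2 s hh ii hgi
        rw [hx, ih out _ (P ++ [e]) hF' hQ'
          (fun w hw => by
            rcases List.mem_append.mp hw with hw | hw
            · exact hLen w hw
            · simp only [List.mem_singleton] at hw; subst hw; exact he)
          hPl' hNdflat hW']
        rw [List.append_assoc]
        rfl
      · -- nonempty queue with front (j, ap)
        set z : Nat × List Char := (j, ap :: suf) with hzdef
        have hfil : P.filter (fun w => w.2.drop 1 = suf) =
            z :: qtail.map (fun jp => (jp.1, jp.2 :: suf)) := by
          rw [← hQ suf, pvQueue_some hg, hd]; rfl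
        have hzP : z ∈ P := by
          have : z ∈ P.filter (fun w => w.2.drop 1 = suf) := by
            rw [hfil]; exact List.mem_cons_self
          exact (List.mem_filter.mp this).1
        have hh0lt : h0 < items.length := by
          by_contra hcon
          have : items.drop h0 = [] := List.drop_eq_nil_iff.mpr (by omega)
          rw [this] at hd
          simp at hd
        by_cases hap : ap = p
        · -- same prefix char at the front: e joins the queue
          subst hap
          have hx : pvBStep d (out, pending) e =
              (out, pending.insert suf (h0, items ++ [(e.1, ap)])) := by
            rw [pvBStep, if_neg (by omega)]
            simp only [hsd, hpd, hg, hd]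
            rw [if_neg (by simp)]
          have hze : z.2 = e.2 := by rw [he2]
          have hQ' : ∀ s, pvQueue (pending.insert suf (h0, items ++ [(e.1, ap)])) s =
              (P ++ [e]).filter (fun w => w.2.drop 1 = s) := by
            intro s
            rw [List.filter_append]
            by_cases hs : s = suf
            · rw [hs, pvQueue_some (PySem.Dict.get?_insert_self _ _ _),
                List.drop_append_of_le_length (by omega), List.map_append, ← pvQueue_some hg,
                hQ suf]
              simp [← he2, ht]
            · rw [pvQueue, PySem.Dict.get?_insert_of_ne _ _ hs, ← pvQueue, hQ s]
              have hnil : [e].filter (fun w => w.2.drop 1 = s) = [] := by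
                have hdec : (decide (e.2.tail = s)) = false := by
                  rw [ht]; exact decide_eq_false (fun h => hs h.symm)
                simp [List.filter, List.drop_one, hdec]
              rw [hnil, List.append_nil]
          have hPl' : pvPairless (P ++ [e]) := by
            refine pvPairless_append hPl ?_
            intro w hw hww
            have : w.2 = z.2 := hPl w hw z hzP (by rw [hww, hsd, hzdef]; rfl)
            rw [this, hze]
          have hW' : pvDW (pending.insert suf (h0, items ++ [(e.1, ap)])) := by
            refine ⟨PySem.Dict.nodup_keys_insert _ _ _ hW.1, ?_⟩
            intro s hh ii hgi
            by_cases hs : s = suf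
            · subst hs
              rw [PySem.Dict.get?_insert_self] at hgi
              cases hgi
              rw [List.length_append]
              omega
            · rw [PySem.Dict.get?_insert_of_ne _ _ hs] at hgi
              exact hW.2 s hh ii hgi
          rw [hx, ih out _ (P ++ [e]) hF' hQ'
            (fun w hw => by
              rcases List.mem_append.mp hw with hw | hw
              · exact hLen w hw
              · simp only [List.mem_singleton] at hw; subst hw; exact he)
            hPl' hNdflat hW']
          rw [List.append_assoc]
          rfl
        · -- different prefix char: pair z with e, write the combined step at slot j
          have hx : pvBStep d (out, pending) e =
              (out.set j (some (ap :: (d ++ p :: suf))), pending.insert suf (h0 + 1, items)) := by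
            rw [pvBStep, if_neg (by omega)]
            simp only [hsd, hpd, hg, hd]
            rw [if_pos (by simpa using hap)]
          have hQ' : ∀ s, pvQueue (pending.insert suf (h0 + 1, items)) s =
              (pvRemoveFirst z P).filter (fun w => w.2.drop 1 = s) := by
            intro s
            by_cases hs : s = suf
            · rw [hs, pvQueue_some (PySem.Dict.get?_insert_self _ _ _),
                pvRemoveFirst_filter _ _ _ (by simp [hzdef]), hfil,
                show pvRemoveFirst z (z :: qtail.map (fun jp => (jp.1, jp.2 :: suf))) =
                  qtail.map (fun jp => (jp.1, jp.2 :: suf)) by rw [pvRemoveFirst, if_pos rfl]]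
              have : items.drop (h0 + 1) = qtail := by
                have h1 : items.drop (h0 + 1) = (items.drop h0).drop 1 := by
                  rw [List.drop_drop]
                rw [h1, hd]
                rfl
              rw [this]
            · rw [pvQueue, PySem.Dict.get?_insert_of_ne _ _ hs, ← pvQueue, hQ s,
                pvRemoveFirst_filter_of_neg _ _ _ (by simp [hzdef]; exact fun h => hs h.symm)]
          have hW' : pvDW (pending.insert suf (h0 + 1, items)) := by
            refine ⟨PySem.Dict.nodup_keys_insert _ _ _ hW.1, ?_⟩
            intro s hh ii hgi
            by_cases hs : s = suf
            · subst hs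
              rw [PySem.Dict.get?_insert_self] at hgi
              cases hgi
              omega
            · rw [PySem.Dict.get?_insert_of_ne _ _ hs] at hgi
              exact hW.2 s hh ii hgi
          have hNd' : ((pvRemoveFirst z P ++ rem').map Prod.fst).Nodup := by
            refine List.Nodup.sublist (List.Sublist.map _ ?_) hNd
            exact List.Sublist.append (pvRemoveFirst_sublist z P)
              (List.sublist_cons_self e rem')
          rw [hx, ih _ _ (pvRemoveFirst z P) hF' hQ'
            (fun w hw => hLen w ((pvRemoveFirst_sublist z P).mem hw))
            (fun x hx2 y hy2 => hPl x ((pvRemoveFirst_sublist z P).mem hx2)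
              y ((pvRemoveFirst_sublist z P).mem hy2))
            hNd' hW']
          -- absorb the pairing on the spec side
          have habs := pvCIdx_absorb d P rem' e z hPl
            (by rw [hsd, hfil]; rfl)
            (by rw [he2]; simp [hzdef]; exact fun h => hap h)
            hNd
          have hvz : (z.1, z.2.take 1 ++ d ++ e.2.take 1 ++ z.2.drop 1) =
              (j, ap :: (d ++ p :: suf)) := by
            rw [he2]; simp [hzdef]
          rw [hvz] at habs
          have hndC : ((pvCIdx d (P ++ e :: rem')).map Prod.fst).Nodup :=
            List.Nodup.sublist (pvCIdx_fst_sublist d _) hNd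
          rw [pvWriteAll_perm out habs hndC]
          rfl

theorem pvBStep_skip (d : List Char) (l : List (Nat × List Char)) st :
    l.foldl (pvBStep d) st = (l.filter (fun e => 2 ≤ e.2.length)).foldl (pvBStep d) st := by
  induction l generalizing st with
  | nil => rfl
  | cons e t ih =>
    by_cases he : 2 ≤ e.2.length
    · rw [List.filter_cons_of_pos (by simpa using he)]
      simp only [List.foldl_cons]
      exact ih _
    · rw [List.filter_cons_of_neg (by simpa using he)]
      simp only [List.foldl_cons]
      rw [show pvBStep d st e = st by rw [pvBStep, if_pos (by omega)]]
      exact ih _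

-- ---- assembly ----

theorem combine_UL_eq_alt (steps : List String) (divider : String) :
    combine_UL steps divider = combine_UL_alt steps divider := by
  unfold combine_UL combine_UL_alt
  by_cases hlen : steps.length ≤ 1
  · rw [if_pos hlen, if_pos hlen]
  · rw [if_neg hlen, if_neg hlen]
    rw [pvLoopA_eq, List.nil_append]
    congr 1
    set d := divider.toList
    set sl := steps.map String.toList with hsl
    set n := sl.length with hn
    set L := (List.range n).zip sl with hL
    set enumF := L.filter (fun e => 2 ≤ e.2.length) with hEF
    have hfst : L.map Prod.fst = List.range n := by
      rw [hL, List.map_fst_zip]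
      rw [List.length_range]
    have hsnd : L.map Prod.snd = sl := by
      rw [hL, List.map_snd_zip]
      rw [List.length_range]
    have hfstF : List.Sublist (enumF.map Prod.fst) (List.range n) := by
      rw [← hfst]
      exact List.Sublist.map _ List.filter_sublist
    have hmain := pvMain d enumF (List.replicate n none) PySem.Dict.empty []
      (fun e he => by
        have := (List.mem_filter.mp he).2
        simpa using this)
      (fun suf => by rw [pvQueue_none (PySem.Dict.get?_empty suf)]; rfl)
      (by intro w hw; simp at hw)
      (by intro a ha; simp at ha)
      (by
        rw [List.nil_append]
        exact List.Nodup.sublist hfstF List.nodup_range)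
      ⟨by rw [PySem.Dict.keys_empty]; exact List.nodup_nil,
       fun suf hh ii hgi => by rw [PySem.Dict.get?_empty] at hgi; simp at hgi⟩
    rw [List.nil_append] at hmain
    rw [pvBStep_skip, ← hEF, hmain]
    have hsort : ((pvCIdx d enumF).map Prod.fst).Pairwise (· < ·) :=
      List.Pairwise.sublist ((pvCIdx_fst_sublist d enumF).trans hfstF) List.pairwise_lt_range
    have hbound : ∀ z ∈ pvCIdx d enumF, z.1 < n := by
      intro z hz
      have : z.1 ∈ List.range n :=
        ((pvCIdx_fst_sublist d enumF).trans hfstF).mem (List.mem_map_of_mem hz)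
      exact List.mem_range.mp this
    rw [pvWriteAll_filterMap n _ hsort hbound, pvCIdx_proj]
    congr 1
    rw [hEF, ← hsnd, List.filter_map]
    rfl

-- ===== VERDICT (by name: the statement is the Claim_ definition above) =====
theorem combine_UL_spec : Claim_equal_combine_UL := by
  intro steps divider _
  unfold Spec_combine_UL
  exact combine_UL_eq_alt steps divider
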